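-- pv_equiv track=rewrite | github.com/bdematte/pd-stats-python | main.py | update_top
-- ===== SOURCE A (Python) =====
-- import copy
--
-- def update_top(current_dict, new_value, current_boundary):
--     if len(current_dict) < 5 :
--         current_dict[new_value[0]] = new_value[1]
--         if current_boundary == 0 :
--             current_boundary = new_value[1]
--         return min(current_boundary, new_value[1])
--     elif current_boundary < new_value[1]:
--         is_deleted=False
--         current_dict[new_value[0]] = new_value[1]
--         loop_dir=copy.deepcopy(current_dict)
--         for alert in loop_dir.items():
--             if alert[1] == current_boundary :
--                 if is_deleted == False :
--                     del current_dict[alert[0]]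
--                     is_deleted=True
--                 else :
--                     return current_boundary
--         return min(current_dict.values())
--     else :
--         return current_boundary
-- ===== SOURCE B (Python) =====
-- def update_top(current_dict, new_value, current_boundary):
--     if len(current_dict) < 5:
--         current_dict[new_value[0]] = new_value[1]
--         if current_boundary == 0:
--             current_boundary = new_value[1]
--         return min(current_boundary, new_value[1])
--     if new_value[1] <= current_boundary:
--         return current_boundary
--     current_dict[new_value[0]] = new_value[1]
--     vals = sorted(current_dict.values())
--     c = vals.count(current_boundary)
--     if c >= 2:
--         return current_boundary
--     if c == 1 and vals[0] == current_boundary: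
--         return vals[1]
--     return vals[0]
-- ===== Notes on version B (the rewrite author's own statement) =====
-- stated objective: alternative
-- what changed: The middle branch's deepcopy plus delete-while-iterating key scan with in-loop early returns is replaced by a value-multiset computation: sort the values, count occurrences of the boundary, and read the answer off the sorted list (boundary if it occurs twice, second-smallest if the boundary is the unique minimum, else the smallest); B never searches for or deletes a matching key to compute the return value. Pre_ excludes association lists with duplicate keys, which do not encode any Python dict.
import Mathlib
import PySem

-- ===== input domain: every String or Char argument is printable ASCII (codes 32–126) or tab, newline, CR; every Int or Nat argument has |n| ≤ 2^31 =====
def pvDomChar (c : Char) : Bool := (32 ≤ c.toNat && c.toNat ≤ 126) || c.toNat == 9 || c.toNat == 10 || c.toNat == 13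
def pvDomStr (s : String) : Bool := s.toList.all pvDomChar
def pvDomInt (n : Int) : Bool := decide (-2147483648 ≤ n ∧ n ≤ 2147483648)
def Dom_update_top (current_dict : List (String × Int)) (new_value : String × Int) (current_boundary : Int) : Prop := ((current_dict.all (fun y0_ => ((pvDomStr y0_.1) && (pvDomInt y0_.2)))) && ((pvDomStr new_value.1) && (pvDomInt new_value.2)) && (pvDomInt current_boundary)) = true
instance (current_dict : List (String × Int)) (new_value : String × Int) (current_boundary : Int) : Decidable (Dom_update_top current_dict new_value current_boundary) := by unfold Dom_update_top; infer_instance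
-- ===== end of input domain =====

-- B recomputes the middle branch from the value multiset (sorted values + a count of the boundary)
-- instead of A's deepcopy + delete-while-iterating key scan; objective: alternative. Both Pythons insert
-- new_value into current_dict, but A additionally deletes a matching key while B does not: the
-- equivalence proved here is about the RETURN value only.


-- ===== PORT A =====
-- min(d.values()), called by both Pythons only on nonempty dicts, so the default 0 is never the result
def pvMinVals (d : PySem.Dict String Int) : Int :=
  (PySem.List.min? d.values (fun x => x)).getD 0

-- the 'for alert in loop_dir.items():' loop, with the is_deleted flag and both early returns
def updateTopLoopA : List (String × Int) → PySem.Dict String Int → Bool → Int → Int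
  | [], d, _, _ => pvMinVals d
  | (k, v) :: rest, d, isDel, cb =>
    if v == cb then
      if isDel == false then updateTopLoopA rest (d.erase k) true cb
      else cb
    else updateTopLoopA rest d isDel cb

def update_top (current_dict : List (String × Int)) (new_value : String × Int) (current_boundary : Int) : Int :=
  if PySem.List.len current_dict < 5 then
    let cb := if current_boundary == 0 then new_value.2 else current_boundary
    min cb new_value.2
  else if current_boundary < new_value.2 then
    let d := (PySem.Dict.mk current_dict).insert new_value.1 new_value.2
    updateTopLoopA d.items d false current_boundary
  else current_boundary

-- ===== PORT B =====
def update_top_alt (current_dict : List (String × Int)) (new_value : String × Int) (current_boundary : Int) : Int :=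
  if PySem.List.len current_dict < 5 then
    let cb := if current_boundary == 0 then new_value.2 else current_boundary
    min cb new_value.2
  else if new_value.2 ≤ current_boundary then current_boundary
  else
    let d := (PySem.Dict.mk current_dict).insert new_value.1 new_value.2
    let vals := PySem.List.sorted d.values (fun x => x)
    let c := vals.count current_boundary
    if 2 ≤ c then current_boundary
    else if c = 1 ∧ PySem.List.pyGetD vals 0 0 = current_boundary then PySem.List.pyGetD vals 1 0
    else PySem.List.pyGetD vals 0 0

-- ===== PRECONDITION & SPEC =====
-- Pre_ excludes association lists with duplicate keys: they do not encode any Python dict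
-- (the Python argument is a dict, whose keys are necessarily distinct).
def Pre_update_top (current_dict : List (String × Int)) (new_value : String × Int) (current_boundary : Int) : Prop :=
  (current_dict.map Prod.fst).Nodup
instance (current_dict : List (String × Int)) (new_value : String × Int) (current_boundary : Int) : Decidable (Pre_update_top current_dict new_value current_boundary) := by unfold Pre_update_top; infer_instance

def pvWitness_update_top : (List (String × Int)) × (String × Int) × Int :=
  ([("a", 1), ("b", 2), ("c", 3), ("d", 4), ("e", 5)], ("f", 6), 1)

def Spec_update_top (current_dict : List (String × Int)) (new_value : String × Int) (current_boundary : Int) (out : Int) : Prop := out = update_top_alt current_dict new_value current_boundary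
instance (current_dict : List (String × Int)) (new_value : String × Int) (current_boundary : Int) (out : Int) : Decidable (Spec_update_top current_dict new_value current_boundary out) := by unfold Spec_update_top; infer_instance

-- ===== CLAIM =====
def Claim_equal_update_top : Prop := ∀ (current_dict : List (String × Int)) (new_value : String × Int) (current_boundary : Int), Dom_update_top current_dict new_value current_boundary → Pre_update_top current_dict new_value current_boundary → Spec_update_top current_dict new_value current_boundary (update_top current_dict new_value current_boundary)

-- ===== LEMMAS AND PROOFS =====

-- after the first deletion A's loop only scans for a second match and never touches d again
theorem loopA_true (items : List (String × Int)) (d : PySem.Dict String Int) (cb : Int) :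
    updateTopLoopA items d true cb =
      if items.any (fun p => p.2 == cb) then cb else pvMinVals d := by
  induction items with
  | nil => simp [updateTopLoopA]
  | cons p rest ih =>
    obtain ⟨k, v⟩ := p
    rw [List.any_cons]
    by_cases h : v = cb
    · simp [updateTopLoopA, h]
    · have hb : (v == cb) = false := beq_eq_false_iff_ne.mpr h
      rw [hb, Bool.false_or]
      simpa [updateTopLoopA, hb] using ih

-- characterisation of A's whole loop by the sublist of items whose value equals the boundary
theorem loopA_false (items : List (String × Int)) (d : PySem.Dict String Int) (cb : Int) :
    updateTopLoopA items d false cb =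
      match items.filter (fun p => p.2 == cb) with
      | [] => pvMinVals d
      | (k, _) :: rest => if rest = [] then pvMinVals (d.erase k) else cb := by
  induction items generalizing d with
  | nil => simp [updateTopLoopA]
  | cons p rest ih =>
    obtain ⟨k, v⟩ := p
    by_cases h : v = cb
    · subst h
      rw [List.filter_cons_of_pos (by simp)]
      have hL : updateTopLoopA ((k, v) :: rest) d false v = updateTopLoopA rest (d.erase k) true v := by
        simp [updateTopLoopA]
      have hM : (match (k, v) :: rest.filter (fun p => p.2 == v) with
            | [] => pvMinVals d
            | (k, _) :: rest => if rest = [] then pvMinVals (d.erase k) else v)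
          = if rest.filter (fun p => p.2 == v) = [] then pvMinVals (d.erase k) else v := rfl
      rw [hL, loopA_true, hM]
      by_cases hf : rest.filter (fun p => p.2 == v) = []
      · have hany : rest.any (fun p => p.2 == v) = false := by
          rw [List.any_eq_false]
          intro q hq
          simp only [List.filter_eq_nil_iff] at hf
          simpa using hf q hq
        simp [hany, hf]
      · have hany : rest.any (fun p => p.2 == v) = true := by
          rw [List.any_eq_true]
          rcases List.exists_mem_of_ne_nil _ hf with ⟨q, hq⟩
          exact ⟨q, (List.mem_filter.mp hq).1, (List.mem_filter.mp hq).2⟩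
        simp [hany, hf]
    · have hb : (v == cb) = false := beq_eq_false_iff_ne.mpr h
      rw [List.filter_cons_of_neg (by simp [h])]
      have hL : updateTopLoopA ((k, v) :: rest) d false cb = updateTopLoopA rest d false cb := by
        simp [updateTopLoopA, hb]
      rw [hL]
      exact ih d

-- min over a list is the head of its sort (0 on the empty list on both sides)
theorem minVals_eq_sorted_head (vs : List Int) :
    (PySem.List.min? vs (fun x => x)).getD 0 =
      (PySem.List.sorted vs (fun x => x)).getD 0 0 := by
  rcases hsort : PySem.List.sorted vs (fun x => x) with _ | ⟨m, t⟩
  · have h : vs = [] := (PySem.List.sorted_eq_nil_iff vs _ false).mp hsort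
    subst h
    simp [PySem.List.min?]
  have h : vs ≠ [] := by
    intro he
    rw [he] at hsort
    simp [PySem.List.sorted] at hsort
  rcases hmin : PySem.List.min? vs (fun x => x) with _ | m0
  · exact absurd ((PySem.List.min?_eq_none_iff vs _).mp hmin) h
  have hm0mem : m0 ∈ vs := PySem.List.min?_mem hmin
  have hmmem : m ∈ vs := by
    have : m ∈ PySem.List.sorted vs (fun x => x) := by rw [hsort]; exact List.mem_cons_self
    exact (PySem.List.mem_sorted vs _ false m).mp this
  have : m0 = m :=
    le_antisymm (PySem.List.min?_isMin hmin m hmmem)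
      (PySem.List.key_head_sorted_le vs (fun x => x) hsort m0 hm0mem)
  simp [this]

-- erasing the key of the FIRST value-match from a nodup-key dict erases the first matching value
theorem values_erase_first (d : PySem.Dict String Int) (hnd : d.keys.Nodup) (cb : Int)
    (k : String) (rest : List (String × Int))
    (hf : d.items.filter (fun p => p.2 == cb) = (k, cb) :: rest) :
    (d.erase k).values = d.values.erase cb := by
  obtain ⟨l⟩ := d
  simp only [PySem.Dict.keys] at hnd
  simp only [PySem.Dict.erase, PySem.Dict.values] at *
  induction l with
  | nil => simp at hf
  | cons p t ih =>
    obtain ⟨k', v⟩ := p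
    simp only [List.map_cons, List.nodup_cons, List.mem_map] at hnd
    by_cases hv : v = cb
    · subst hv
      rw [List.filter_cons_of_pos (by simp)] at hf
      obtain ⟨hk, -⟩ := List.cons.injEq .. ▸ hf
      obtain ⟨rfl, -⟩ := Prod.mk.injEq .. ▸ hk
      have hknot : ∀ q ∈ t, (!q.1 == k') = true := by
        intro q hq
        simp only [Bool.not_eq_eq_eq_not, Bool.not_true, beq_eq_false_iff_ne]
        intro he
        exact hnd.1 ⟨q, hq, he⟩
      rw [List.filter_cons_of_neg (by simp), List.filter_eq_self.mpr hknot]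
      simp [List.erase_cons_head]
    · rw [List.filter_cons_of_neg (by simp [hv])] at hf
      have hkmem : (k, cb) ∈ t := by
        have : (k, cb) ∈ t.filter (fun p => p.2 == cb) := by rw [hf]; exact List.mem_cons_self
        exact (List.mem_filter.mp this).1
      have hne : ¬ (k' == k) = true := by
        simp only [beq_iff_eq]
        rintro rfl
        exact hnd.1 ⟨(k', cb), hkmem, rfl⟩
      rw [List.filter_cons_of_pos (by simpa using hne)]
      simp only [List.map_cons]
      rw [List.erase_cons_tail (by simpa using hv)]
      rw [ih hnd.2 hf]

-- ===== VERDICT =====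
theorem update_top_spec : Claim_equal_update_top := by
  intro cd nv cb _ hpre
  unfold Spec_update_top update_top update_top_alt
  simp only [PySem.List.len_eq]
  by_cases h5 : (cd.length : Int) < 5
  · simp [h5]
  by_cases hlt : cb < nv.2
  · have hle : ¬ nv.2 ≤ cb := by omega
    simp only [h5, hlt, hle, if_false, if_true]
    set d := (PySem.Dict.mk cd).insert nv.1 nv.2 with hd
    set s := PySem.List.sorted d.values (fun x => x) with hs
    have hnd : d.keys.Nodup :=
      PySem.Dict.nodup_keys_insert _ _ _ (by simpa [PySem.Dict.keys] using hpre)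
    have hcnt : s.count cb = (d.items.filter (fun p => p.2 == cb)).length := by
      rw [hs, (PySem.List.sorted_perm d.values (fun x => x) false).count_eq]
      simp only [PySem.Dict.values]
      rw [List.count_eq_countP, List.countP_map, List.countP_eq_length_filter]
      rfl
    rw [loopA_false]
    rcases hf : d.items.filter (fun p => p.2 == cb) with _ | ⟨⟨k, v⟩, rest⟩
    · -- no value equals the boundary: both sides are min of the values
      have hc0 : s.count cb = 0 := by rw [hcnt, hf]; rfl
      rw [hf]
      simp only [hc0]
      norm_num
      rw [PySem.List.pyGetD_zero, pvMinVals, minVals_eq_sorted_head, ← hs]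
    · have hv : v = cb := by
        have : (k, v) ∈ d.items.filter (fun p => p.2 == cb) := by
          rw [hf]; exact List.mem_cons_self
        simpa using (List.mem_filter.mp this).2
      subst hv
      rw [hf]
      rcases rest with _ | ⟨q, rest'⟩
      · -- exactly one value equals the boundary
        have hc1 : s.count v = 1 := by rw [hcnt, hf]; rfl
        have hev : (d.erase k).values = d.values.erase v :=
          values_erase_first d hnd v k [] hf
        have hsp : (s.erase v).Pairwise (fun a b => a ≤ b) :=
          (PySem.List.sorted_pairwise d.values (fun x => x)).sublist (List.erase_sublist ..)
        have hA : pvMinVals (d.erase k) = (s.erase v).getD 0 0 := by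
          rw [pvMinVals, hev, minVals_eq_sorted_head,
            PySem.List.sorted_eq_sorted_of_perm _ _ _ (fun a b h => h)
              (((PySem.List.sorted_perm d.values (fun x => x) false).erase v).symm),
            ← hs, PySem.List.sorted_eq_self_of_pairwise _ _ hsp]
        have hvs : v ∈ s := List.count_pos_iff.mp (by omega)
        rcases hs' : s with _ | ⟨m, t⟩
        · rw [hs'] at hvs; simp at hvs
        rw [hs'] at hA hc1
        show pvMinVals (d.erase k) = _
        rw [hA, if_neg (by omega : ¬ 2 ≤ List.count v (m :: t))]
        by_cases hm : m = v
        · subst hm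
          rw [if_pos ⟨hc1, PySem.List.pyGetD_zero_cons ..⟩, List.erase_cons_head,
            (by norm_num : (1 : Int) = ((1 : Nat) : Int)), PySem.List.pyGetD_natCast]
          rfl
        · rw [if_neg (fun h => hm (by rw [PySem.List.pyGetD_zero_cons] at h; exact h.2)),
            List.erase_cons_tail (by simpa using hm), PySem.List.pyGetD_zero_cons]
          rfl
      · -- at least two values equal the boundary: both sides return it
        have hc2 : 2 ≤ s.count v := by rw [hcnt, hf]; simp
        simp [hc2]
  · have hle : nv.2 ≤ cb := by omega
    simp [h5, hlt, hle]
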